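-- pv_equiv track=rewrite | github.com/danieltuzes/collection | py_interview/message_from_newspaper.py | check_if_subs2
-- ===== SOURCE A (Python) =====
-- def check_if_subs2(m_in: str, m_test: str) -> None:
--     """Test if m_test can be covered from m_in"""
--     chars: dict[str:int] = dict()
--     for char in m_test:
--         if char in chars:
--             chars[char] += 1
--         else:
--             chars[char] = 1
--
--     for char in m_in:
--         if char in chars:
--             chars[char] -= 1
--             if chars[char] == 0:
--                 del chars[char]
--
--     if not chars:
--         return True
--
--     return False
-- ===== SOURCE B (Python) =====
-- def check_if_subs2(m_in: str, m_test: str) -> bool: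
--     """Test if m_test can be covered from m_in"""
--     return all(m_test.count(c) <= m_in.count(c) for c in set(m_test))
-- ===== Notes on version B (the rewrite author's own statement) =====
-- stated objective: idiomatic
-- what changed: Replaced the single-dict build-then-decrement-and-delete-then-check-empty flow by a direct subset test: for each distinct character of m_test, compare its count in m_test with its count in m_in and return the conjunction.
import Mathlib
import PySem

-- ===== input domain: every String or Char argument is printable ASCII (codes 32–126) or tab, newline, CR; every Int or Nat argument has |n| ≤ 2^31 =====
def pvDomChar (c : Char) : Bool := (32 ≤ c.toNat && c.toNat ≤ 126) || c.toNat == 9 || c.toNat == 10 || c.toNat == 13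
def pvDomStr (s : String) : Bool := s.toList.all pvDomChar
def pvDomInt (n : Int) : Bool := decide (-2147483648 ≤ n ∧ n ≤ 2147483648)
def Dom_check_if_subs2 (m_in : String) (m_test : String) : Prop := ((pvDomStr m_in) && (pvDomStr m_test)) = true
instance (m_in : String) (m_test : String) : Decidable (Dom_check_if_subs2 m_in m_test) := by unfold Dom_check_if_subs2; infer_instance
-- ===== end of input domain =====

-- B replaces A's decrement-and-delete dict flow by a per-distinct-character count comparison (idiomatic).


-- ===== PORT A =====
-- first loop body: 'if char in chars: chars[char] += 1 else: chars[char] = 1'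
def pvALoop1 (d : PySem.Dict Char Int) (c : Char) : PySem.Dict Char Int :=
  if d.contains c then d.insert c (d.getD c 0 + 1) else d.insert c 1

-- second loop body: 'if char in chars: chars[char] -= 1; if chars[char] == 0: del chars[char]'
def pvALoop2 (d : PySem.Dict Char Int) (c : Char) : PySem.Dict Char Int :=
  if d.contains c then
    let d' := d.insert c (d.getD c 0 - 1)
    if d'.getD c 0 = 0 then d'.erase c else d'
  else d

def check_if_subs2 (m_in : String) (m_test : String) : Bool :=
  let chars := m_test.toList.foldl pvALoop1 PySem.Dict.empty
  let chars := m_in.toList.foldl pvALoop2 chars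
  chars.size == 0          -- 'if not chars: return True / return False'

-- ===== PORT B =====
-- 'all(m_test.count(c) <= m_in.count(c) for c in set(m_test))'; c is a single character,
-- so Python's str.count(c) is exactly the character count (List.count) — exact here.
def check_if_subs2_alt (m_in : String) (m_test : String) : Bool :=
  (PySem.Set.ofList m_test.toList).all
    (fun c => decide (m_test.toList.count c ≤ m_in.toList.count c))

-- ===== PRECONDITION & SPEC =====
def Spec_check_if_subs2 (m_in : String) (m_test : String) (out : Bool) : Prop := out = check_if_subs2_alt m_in m_test
instance (m_in : String) (m_test : String) (out : Bool) : Decidable (Spec_check_if_subs2 m_in m_test out) := by unfold Spec_check_if_subs2; infer_instance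

-- ===== CLAIM (what is proved, stated in full; the proofs are below) =====
def Claim_equal_check_if_subs2 : Prop := ∀ (m_in : String) (m_test : String), Dom_check_if_subs2 m_in m_test → Spec_check_if_subs2 m_in m_test (check_if_subs2 m_in m_test)

-- ===== LEMMAS AND PROOFS =====

-- A's first loop is exactly the Counter-building loop.
theorem pvALoop1_eq (d : PySem.Dict Char Int) (c : Char) :
    pvALoop1 d c = d.insert c (d.getD c 0 + 1) := by
  unfold pvALoop1
  by_cases h : d.contains c = true
  · simp [h]
  · have h' : d.contains c = false := by simpa using h
    have h0 : d.getD c 0 = 0 := by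
      rw [PySem.Dict.getD_of_not_contains]; exact h'
    simp [h', h0]

theorem pvALoop1_foldl (xs : List Char) :
    xs.foldl pvALoop1 PySem.Dict.empty = PySem.Dict.counter xs := by
  have h : xs.foldl pvALoop1 PySem.Dict.empty
      = xs.foldl (fun d x => d.insert x (d.getD x 0 + 1)) PySem.Dict.empty := by
    apply PySem.List.foldl_congr_mem
    intro acc x _
    exact pvALoop1_eq acc x
  rw [h, PySem.Dict.foldl_insert_getD_add_one_eq_counter]

-- map-then-filter on an items list: replacing the x-keyed entry then dropping key x
theorem pvFilterMapKey (l : List (Char × Int)) (x : Char) (w : Int) :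
    ((l.map (fun p => if p.1 == x then (x, w) else p)).filter (fun p => p.1 != x))
      = l.filter (fun p => p.1 != x) := by
  rw [List.filter_map]
  have h1 : ∀ p ∈ l, ((fun p : Char × Int => p.1 != x) ∘ (fun p : Char × Int => if p.1 == x then (x, w) else p)) p = (p.1 != x) := by
    intro p _
    by_cases h : p.1 = x <;> simp [h]
  rw [List.filter_congr h1]
  have h2 : ∀ p ∈ l.filter (fun p : Char × Int => p.1 != x),
      (if p.1 == x then (x, w) else p) = p := by
    intro p hp
    have hb := (List.mem_filter.mp hp).2
    have hne : p.1 ≠ x := by simpa using hb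
    simp [hne]
  rw [List.map_congr_left h2]; simp

-- The decrement-and-delete loop empties the dict iff every entry's demand is met by xs.
theorem pvALoop2_main (xs : List Char) :
    ∀ (d : PySem.Dict Char Int), d.keys.Nodup → (∀ p ∈ d.items, 0 < p.2) →
    ((xs.foldl pvALoop2 d).items = [] ↔ ∀ p ∈ d.items, p.2 ≤ (xs.count p.1 : Int)) := by
  induction xs with
  | nil =>
      intro d _ hpos
      simp only [List.foldl_nil, List.count_nil]
      constructor
      · intro h p hp; rw [h] at hp; simp at hp
      · intro h
        cases hd : d.items with
        | nil => rfl
        | cons p t =>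
            exfalso
            have h1 := hpos p (by rw [hd]; simp)
            have h2 := h p (by rw [hd]; simp)
            omega
  | cons x xs ih =>
      intro d hnd hpos
      rw [List.foldl_cons]
      by_cases hc : d.contains x = true
      · -- x is a key of d; its unique entry is (x, v)
        obtain ⟨v, hv⟩ : ∃ v, d.get? x = some v := by
          have hiso := PySem.Dict.contains_eq_isSome_get? (d := d) (k := x)
          rw [hc] at hiso
          exact Option.isSome_iff_exists.mp hiso.symm
        have hgetD : d.getD x 0 = v := by
          rw [PySem.Dict.getD_eq_get?_getD, hv]; rfl
        have hmem : (x, v) ∈ d.items := by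
          rw [← PySem.Dict.get?_eq_some_iff_mem_items _ _ _ hnd]; exact hv
        have hvpos : 0 < v := hpos _ hmem
        -- every x-keyed entry of d.items equals (x, v)
        have huniq : ∀ p ∈ d.items, p.1 = x → p = (x, v) := by
          rintro ⟨a, b⟩ hp hpx
          simp only at hpx
          subst hpx
          have hg : d.get? a = some b := (PySem.Dict.get?_eq_some_iff_mem_items _ _ _ hnd).mpr hp
          rw [hv] at hg
          have hbv : b = v := by injection hg with h'; exact h'.symm
          rw [hbv]
        have hitems : (d.insert x (v - 1)).items
            = d.items.map (fun p => if p.1 == x then (x, v - 1) else p) := by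
          rw [PySem.Dict.items_insert]
          simp [hc]
        have hd'getD : (d.insert x (v - 1)).getD x 0 = v - 1 := by
          rw [PySem.Dict.getD_insert_self]
        by_cases hv1 : v - 1 = 0
        · -- delete branch
          have hvone : v = 1 := by omega
          have hstep : pvALoop2 d x = (d.insert x (v - 1)).erase x := by
            unfold pvALoop2; rw [hgetD]; simp [hc, hv1]
          have hitems2 : ((d.insert x (v - 1)).erase x).items
              = d.items.filter (fun p => p.1 != x) := by
            have he : ((d.insert x (v - 1)).erase x).items
                = (d.insert x (v - 1)).items.filter (fun p => p.1 != x) := rfl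
            rw [he, hitems, pvFilterMapKey]
          have hnd2 : ((d.insert x (v - 1)).erase x).keys.Nodup := by
            have hsub : ((d.insert x (v - 1)).erase x).keys.Sublist d.keys := by
              show (((d.insert x (v - 1)).erase x).items.map Prod.fst).Sublist
                    (d.items.map Prod.fst)
              rw [hitems2]
              exact List.Sublist.map Prod.fst List.filter_sublist
            exact hnd.sublist hsub
          have hpos2 : ∀ p ∈ ((d.insert x (v - 1)).erase x).items, 0 < p.2 := by
            intro p hp
            rw [hitems2] at hp
            exact hpos p (List.mem_of_mem_filter hp)
          rw [hstep, ih _ hnd2 hpos2]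
          constructor
          · intro h p hp
            by_cases hpx : p.1 = x
            · have hpe := huniq p hp hpx
              rw [hpe, hvone]
              have hcs : (x :: xs).count x = xs.count x + 1 := by
                simp
              rw [hcs]; push_cast; omega
            · have hcnt : (x :: xs).count p.1 = xs.count p.1 := by
                simp [List.count_cons]
                exact fun hh => hpx hh.symm
              rw [hcnt]
              exact h p (by rw [hitems2]; exact List.mem_filter.mpr ⟨hp, by simpa using hpx⟩)
          · intro h p hp
            rw [hitems2] at hp
            obtain ⟨hp', hpxb⟩ := List.mem_filter.mp hp
            have hpx : p.1 ≠ x := by simpa using hpxb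
            have hle := h p hp'
            have hcnt : (x :: xs).count p.1 = xs.count p.1 := by
              simp [List.count_cons]
              exact fun hh => hpx hh.symm
            rwa [hcnt] at hle
        · -- keep branch: entry becomes (x, v-1)
          have hstep : pvALoop2 d x = d.insert x (v - 1) := by
            unfold pvALoop2; rw [hgetD]; simp [hc, hd'getD, hv1]
          have hnd2 : (d.insert x (v - 1)).keys.Nodup := by
            have hk : (d.insert x (v - 1)).keys = d.keys := by
              rw [PySem.Dict.keys_insert_of_contains]
              try exact hc
            rwa [hk]
          have hpos2 : ∀ p ∈ (d.insert x (v - 1)).items, 0 < p.2 := by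
            intro p hp
            rw [hitems] at hp
            obtain ⟨q, hq, hqe⟩ := List.mem_map.mp hp
            by_cases hqx : q.1 = x
            · have hpe : p = (x, v - 1) := by rw [← hqe]; simp [hqx]
              rw [hpe]; simp only; omega
            · have hpe : p = q := by rw [← hqe]; simp [hqx]
              rw [hpe]; exact hpos q hq
          rw [hstep, ih _ hnd2 hpos2]
          rw [hitems, List.forall_mem_map]
          constructor
          · intro h p hp
            by_cases hpx : p.1 = x
            · have hpe := huniq p hp hpx
              have hle := h p hp
              rw [hpe] at hle ⊢
              simp only [beq_self_eq_true, if_true] at hle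
              have hcs : (x :: xs).count x = xs.count x + 1 := by
                simp
              rw [hcs]
              simp only at hle ⊢
              push_cast at hle ⊢; omega
            · have hb : (p.1 == x) = false := by simpa using hpx
              have hle := h p hp
              rw [hb] at hle
              simp only [Bool.false_eq_true, if_false] at hle
              have hcnt : (x :: xs).count p.1 = xs.count p.1 := by
                simp [List.count_cons]
                exact fun hh => hpx hh.symm
              rw [hcnt]
              exact hle
          · intro h p hp
            by_cases hpx : p.1 = x
            · have hpe := huniq p hp hpx
              have hle := h p hp
              rw [hpe] at hle ⊢
              simp only [beq_self_eq_true, if_true]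
              have hcs : (x :: xs).count x = xs.count x + 1 := by
                simp
              rw [hcs] at hle
              simp only at hle ⊢
              push_cast at hle ⊢; omega
            · have hb : (p.1 == x) = false := by simpa using hpx
              have hle := h p hp
              rw [hb]
              simp only [Bool.false_eq_true, if_false]
              have hcnt : (x :: xs).count p.1 = xs.count p.1 := by
                simp [List.count_cons]
                exact fun hh => hpx hh.symm
              rw [hcnt] at hle
              exact hle
      · -- x not a key: dict unchanged
        have hc' : d.contains x = false := by simpa using hc
        have hstep : pvALoop2 d x = d := by unfold pvALoop2; simp [hc']
        rw [hstep, ih _ hnd hpos]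
        have hne : ∀ p ∈ d.items, p.1 ≠ x := by
          intro p hp hpx
          have hk : d.contains p.1 = true := by
            rw [PySem.Dict.contains_iff_mem_keys]
            exact List.mem_map.mpr ⟨p, hp, rfl⟩
          rw [hpx, hc'] at hk
          exact absurd hk (by simp)
        have hcnt : ∀ p ∈ d.items, (x :: xs).count p.1 = xs.count p.1 := by
          intro p hp
          simp [List.count_cons]
          exact fun hh => hne p hp hh.symm
        constructor
        · intro h p hp
          rw [hcnt p hp]
          exact h p hp
        · intro h p hp
          have hle := h p hp
          rwa [hcnt p hp] at hle

-- ===== VERDICT (by name: the statement is the Claim_ definition above) =====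
theorem check_if_subs2_spec : Claim_equal_check_if_subs2 := by
  intro m_in m_test _
  show check_if_subs2 m_in m_test = check_if_subs2_alt m_in m_test
  unfold check_if_subs2 check_if_subs2_alt
  rw [pvALoop1_foldl]
  have hpos : ∀ p ∈ (PySem.Dict.counter m_test.toList).items, 0 < p.2 := by
    intro p hp
    rw [PySem.Dict.items_counter] at hp
    obtain ⟨k, hk, hke⟩ := List.mem_map.mp hp
    have hkmem : k ∈ m_test.toList := by
      have hm := PySem.Set.mem_ofList (xs := m_test.toList) (y := k)
      exact hm.mp hk
    rw [← hke]
    simpa using List.count_pos_iff.mpr hkmem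
  have hmain := pvALoop2_main m_in.toList (PySem.Dict.counter m_test.toList)
    (PySem.Dict.nodup_keys_counter _) hpos
  have hsize : (m_in.toList.foldl pvALoop2 (PySem.Dict.counter m_test.toList)).size
      = (m_in.toList.foldl pvALoop2 (PySem.Dict.counter m_test.toList)).items.length := rfl
  rw [Bool.eq_iff_iff]
  simp only [beq_iff_eq, hsize, List.length_eq_zero_iff, List.all_eq_true, decide_eq_true_eq]
  rw [hmain, PySem.Dict.items_counter, List.forall_mem_map]
  constructor
  · intro h c hc
    have hle := h c hc
    simpa using hle
  · intro h p hp
    have hle := h p hp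
    simpa using hle
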